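-- pv_equiv track=rewrite | github.com/rasmusthog/nafuma | nafuma/dft/phonons.py | get_kpoints_labels
-- ===== SOURCE A (Python) =====
-- def get_kpoints_labels(special_points_labels):
--     ''' Takes the raw special point labels from read_kpoints() and writes them in a way to be used in the bandstructure plots.
--     Where there is a discontinuity in the path, the label is separated with a |.
--
--     Input:
--     special_points_labels: A list of special points as directly read from the KPOINTS-file by read_kpoints()
--
--     Ouput:
--     labels: A list of labels suitable to pass as x-ticks during plotting of the bandstructure plots.'''
--
--
--     # Loop through the raw special points labels list following a set of rules, to extract the labels suitable for plotting
--     labels = []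
--
--     for ind, label in enumerate(special_points_labels):
--
--         # Add the first label as this will be a separate special point
--         if ind == 0:
--             label = '${}$'.format(label) if (label[0] == '\\') else label
--             labels.append(label)
--
--         # Add the last label, as this will also be a separate special point (or will it? Must change this if that is not always the case)
--         elif ind == len(special_points_labels)-1:
--             label = '${}$'.format(label) if (label[0] == '\\') else label
--             labels.append(label)
--
--         # Skip every second entry, as they will repeat due to the way the KPOINTS-file is constructed
--         elif ind%2 != 0:
--             continue
--
--         # Add label if it's continuous (i.e. if the current and previous points are the same), add "previous|current" if discontinuous (i.e. if they are not the same)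
--         else:
--             if label == special_points_labels[ind-1]:
--                 label = '${}$'.format(label) if (label[0] == '\\') else label # If the special point has a greek letter, such as the gamma point, makes sure that the label is enclosed in $ to be rendered correctly.
--                 labels.append(label)
--
--             else:
--                 label = '${}$'.format(label) if (label[0] == '\\') else label # If the special point has a greek letter, such as the gamma point, makes sure that the label is enclosed in $ to be rendered correctly.
--                 previous_label = special_points_labels[ind-1]
--                 previous_label = '${}$'.format(previous_label) if previous_label[0] == '\\' else previous_label # If the special point has a greek letter, such as the gamma point, makes sure that the label is enclosed in $ to be rendered correctly.
--
--                 labels.append("{}|{}".format(previous_label, label))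
--
--
--     return labels
-- ===== SOURCE B (Python) =====
-- def get_kpoints_labels(special_points_labels):
--     def fmt(l):
--         return '${}$'.format(l) if l[0] == '\\' else l
--
--     if not special_points_labels:
--         return []
--     n = len(special_points_labels)
--     # segment ends (odd positions) and the next segment's starts (even interior positions)
--     ends = special_points_labels[1::2]
--     starts = special_points_labels[2:n - 1:2]
--     labels = [fmt(special_points_labels[0])]
--     labels += [fmt(s) if e == s else '{}|{}'.format(fmt(e), fmt(s))
--                for e, s in zip(ends, starts)]
--     if n > 1:
--         labels.append(fmt(special_points_labels[-1]))
--     return labels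
-- ===== Notes on version B (the rewrite author's own statement) =====
-- stated objective: simpler
-- what changed: B has no index loop and no parity/boundary case analysis: it extracts the segment-end labels and the following segment-start labels with two strided slices spl[1::2] and spl[2:n-1:2], zips them and maps the merge rule, then brackets with the formatted first and last labels.
import Mathlib
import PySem

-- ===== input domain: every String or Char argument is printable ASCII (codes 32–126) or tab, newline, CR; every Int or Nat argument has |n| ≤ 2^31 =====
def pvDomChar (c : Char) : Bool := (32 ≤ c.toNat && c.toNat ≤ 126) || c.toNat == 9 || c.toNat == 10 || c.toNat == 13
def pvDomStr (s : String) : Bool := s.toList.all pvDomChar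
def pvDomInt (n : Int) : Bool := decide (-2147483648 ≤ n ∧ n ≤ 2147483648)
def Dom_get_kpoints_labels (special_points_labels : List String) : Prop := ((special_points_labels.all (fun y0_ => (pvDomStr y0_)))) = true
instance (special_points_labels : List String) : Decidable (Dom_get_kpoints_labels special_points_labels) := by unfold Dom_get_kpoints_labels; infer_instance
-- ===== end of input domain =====

-- B replaces A's index loop and parity/boundary case analysis by two strided slices
-- (segment ends and next-segment starts) zipped and mapped through the merge rule;
-- return values agree wherever A returns (Pre_ excludes only inputs where A raises IndexError).

-- ===== PORT A =====
-- '${}$'.format(label) if label[0] == '\\' else label.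
-- label[0] on "" raises IndexError in Python (excluded by Pre_); here the totalized
-- head? test is exact on every nonempty string.
def fmtA (label : String) : String :=
  if label.toList.head? = some '\\' then "$" ++ label ++ "$" else label

-- one iteration of A's loop body (labels is the accumulator, p = (ind, label))
def stepA (spl : List String) (labels : List String) (p : Int × String) : List String :=
  if p.1 = 0 then labels ++ [fmtA p.2]
  else if p.1 = (spl.length : Int) - 1 then labels ++ [fmtA p.2]
  else if PySem.Int.mod p.1 2 ≠ 0 then labels
  else if p.2 = PySem.List.pyGetD spl (p.1 - 1) "" then labels ++ [fmtA p.2]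
  else labels ++ [fmtA (PySem.List.pyGetD spl (p.1 - 1) "") ++ "|" ++ fmtA p.2]

def get_kpoints_labels (special_points_labels : List String) : List String :=
  (PySem.List.enumerate special_points_labels 0).foldl (stepA special_points_labels) []

-- ===== PORT B =====
def fmtB (l : String) : String :=
  if l.toList.head? = some '\\' then "$" ++ l ++ "$" else l

-- step-2 stride of a list: xs[::2].  Used to port the stride part of spl[1::2] and
-- spl[2:n-1:2]; for a positive step Python strides the [start:stop] slice, so this
-- hand port (PySem.List.slice for the bounds, everyOther for the stride) is exact.
def everyOther : List String → List String
  | [] => []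
  | [a] => [a]
  | a :: _ :: t => a :: everyOther t

-- the comprehension body: fmt(s) if e == s else '{}|{}'.format(fmt(e), fmt(s))
def mergeLbl (p : String × String) : String :=
  if p.1 = p.2 then fmtB p.2 else fmtB p.1 ++ "|" ++ fmtB p.2

def get_kpoints_labels_alt (special_points_labels : List String) : List String :=
  if special_points_labels.length = 0 then []
  else
    let n : Int := special_points_labels.length
    let ends := everyOther (PySem.List.slice special_points_labels (some 1) none)          -- spl[1::2]
    let starts := everyOther (PySem.List.slice special_points_labels (some 2) (some (n - 1)))  -- spl[2:n-1:2]
    let labels := fmtB (PySem.List.pyGetD special_points_labels 0 "") :: (ends.zip starts).map mergeLbl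
    if 1 < special_points_labels.length then
      labels ++ [fmtB (PySem.List.pyGetD special_points_labels (-1) "")]
    else labels

-- ===== PRECONDITION & SPEC =====
-- Pre_ excludes exactly the inputs on which Python A raises IndexError (some label whose
-- first character A inspects is the empty string: the first label, the last one when there
-- are at least two, and both members of each interior pair at an even index); skipped
-- odd-index labels may be empty. B raises IndexError on exactly the same inputs.
def Pre_get_kpoints_labels (special_points_labels : List String) : Prop :=
  (special_points_labels = [] ∨ special_points_labels.headD "" ≠ "") ∧
  (special_points_labels.length < 2 ∨ special_points_labels.getLastD "" ≠ "") ∧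
  (∀ i, i < special_points_labels.length → 2 ≤ i → i + 2 ≤ special_points_labels.length →
    i % 2 = 0 →
    special_points_labels.getD i "" ≠ "" ∧ special_points_labels.getD (i - 1) "" ≠ "")

instance (special_points_labels : List String) : Decidable (Pre_get_kpoints_labels special_points_labels) := by
  unfold Pre_get_kpoints_labels; infer_instance

def pvWitness_get_kpoints_labels : List String :=
  ["\\Gamma", "X", "X", "M", "M", "K", "\\Gamma"]

def Spec_get_kpoints_labels (special_points_labels : List String) (out : List String) : Prop := out = get_kpoints_labels_alt special_points_labels
instance (special_points_labels : List String) (out : List String) : Decidable (Spec_get_kpoints_labels special_points_labels out) := by unfold Spec_get_kpoints_labels; infer_instance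

-- ===== CLAIM (what is proved, stated in full; the proofs are below) =====
def Claim_equal_get_kpoints_labels : Prop := ∀ (special_points_labels : List String), Dom_get_kpoints_labels special_points_labels → Pre_get_kpoints_labels special_points_labels → Spec_get_kpoints_labels special_points_labels (get_kpoints_labels special_points_labels)

-- ===== LEMMAS AND PROOFS =====

theorem fmt_eq (l : String) : fmtA l = fmtB l := rfl

-- proof-side characterisation of the merged interior labels of A's loop
def pairsB : List String → List String
  | a :: b :: t => mergeLbl (a, b) :: pairsB t
  | _ => []

theorem everyOther_cons (a : String) (t : List String) :
    everyOther (a :: t) = a :: everyOther (t.drop 1) := by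
  cases t <;> rfl

-- zipping the strided ends/starts reproduces pairsB of the interior
theorem zipEO : ∀ (m : List String) (z : String),
    ((everyOther (m ++ [z])).zip (everyOther (m.drop 1))).map mergeLbl = pairsB m
  | [], _ => rfl
  | [_], _ => rfl
  | a :: b :: t, z => by
    have h1 : everyOther ((a :: b :: t) ++ [z]) = a :: everyOther (t ++ [z]) := rfl
    have h2 : (a :: b :: t).drop 1 = b :: t := rfl
    rw [h1, h2, everyOther_cons]
    simp only [List.zip_cons_cons, List.map_cons, pairsB]
    rw [zipEO t z]

-- A's loop over the tail, two elements at a time: traversing the suffix m ++ [z] of spl,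
-- starting at an odd index k, appends exactly pairsB m followed by the formatted endpoint z.
theorem loopA_suffix (m : List String) (spl acc : List String) (z : String) (k : Nat)
    (hk : k % 2 = 1) (hdrop : spl.drop k = m ++ [z]) :
    (PySem.List.enumerate (m ++ [z]) (k : Int)).foldl (stepA spl) acc
      = (acc ++ pairsB m) ++ [fmtB z] :=
  match m, hdrop with
  | [], hdrop => by
    have hlen : spl.length = k + 1 := by
      have h := congrArg List.length hdrop
      simp [List.length_drop] at h
      omega
    simp only [List.nil_append, PySem.List.enumerate_cons, PySem.List.enumerate_nil,
      List.foldl_cons, List.foldl_nil]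
    unfold stepA
    rw [if_neg (by omega : ¬ ((k : Int) = 0)),
        if_pos (by rw [hlen]; push_cast; ring : (k : Int) = (spl.length : Int) - 1)]
    simp [pairsB, fmt_eq]
  | [a], hdrop => by
    have hlen : spl.length = k + 2 := by
      have h := congrArg List.length hdrop
      simp [List.length_drop] at h
      omega
    simp only [List.cons_append, List.nil_append, PySem.List.enumerate_cons,
      PySem.List.enumerate_nil, List.foldl_cons, List.foldl_nil]
    have hm : PySem.Int.mod (k : Int) 2 = (k : Int) % 2 :=
      PySem.Int.mod_eq_emod_of_pos (by omega)
    have e1 : stepA spl acc ((k : Int), a) = acc := by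
      unfold stepA
      rw [if_neg (by omega : ¬ ((k : Int) = 0)),
          if_neg (by rw [hlen]; push_cast; omega : ¬ ((k : Int) = (spl.length : Int) - 1)),
          if_pos (by rw [hm]; omega : PySem.Int.mod (k : Int) 2 ≠ 0)]
    rw [e1]
    unfold stepA
    rw [if_neg (by omega : ¬ ((k : Int) + 1 = 0)),
        if_pos (by rw [hlen]; push_cast; ring : (k : Int) + 1 = (spl.length : Int) - 1)]
    simp [pairsB, fmt_eq]
  | a :: b :: t, hdrop => by
    have hlen : spl.length = k + t.length + 3 := by
      have h := congrArg List.length hdrop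
      simp [List.length_drop] at h
      omega
    simp only [List.cons_append, PySem.List.enumerate_cons, List.foldl_cons]
    have hm : PySem.Int.mod (k : Int) 2 = (k : Int) % 2 :=
      PySem.Int.mod_eq_emod_of_pos (by omega)
    have hm1 : PySem.Int.mod ((k : Int) + 1) 2 = ((k : Int) + 1) % 2 :=
      PySem.Int.mod_eq_emod_of_pos (by omega)
    have e1 : stepA spl acc ((k : Int), a) = acc := by
      unfold stepA
      rw [if_neg (by omega : ¬ ((k : Int) = 0)),
          if_neg (by rw [hlen]; push_cast; omega : ¬ ((k : Int) = (spl.length : Int) - 1)),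
          if_pos (by rw [hm]; omega : PySem.Int.mod (k : Int) 2 ≠ 0)]
    have hga : PySem.List.pyGetD spl ((k : Int) + 1 - 1) "" = a := by
      have h0 : (spl.drop k)[0]? = some a := by rw [hdrop]; rfl
      rw [List.getElem?_drop] at h0
      have hsub : (k : Int) + 1 - 1 = ((k : Nat) : Int) := by ring
      simp only [Nat.add_zero] at h0
      rw [hsub, PySem.List.pyGetD_natCast]
      simp [List.getD_eq_getElem?_getD, h0]
    have e2 : stepA spl acc ((k : Int) + 1, b) = acc ++ [mergeLbl (a, b)] := by
      unfold stepA
      rw [if_neg (by omega : ¬ ((k : Int) + 1 = 0)),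
          if_neg (by rw [hlen]; push_cast; omega : ¬ ((k : Int) + 1 = (spl.length : Int) - 1)),
          if_neg (by rw [hm1]; omega : ¬ (PySem.Int.mod ((k : Int) + 1) 2 ≠ 0)), hga]
      by_cases hab : a = b
      · subst hab; simp [mergeLbl, fmt_eq]
      · rw [if_neg (fun h => hab h.symm)]
        simp [mergeLbl, if_neg hab, fmt_eq]
    rw [e1, e2]
    have hd2 : spl.drop (k + 2) = t ++ [z] := by
      have h2 : List.drop 2 (List.drop k spl) = List.drop (k + 2) spl := List.drop_drop
      rw [← h2, hdrop]
      rfl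
    have ih := loopA_suffix t spl (acc ++ [mergeLbl (a, b)]) z (k + 2) (by omega) hd2
    have hcast : (((k + 2 : Nat)) : Int) = (k : Int) + 1 + 1 := by push_cast; ring
    rw [hcast] at ih
    rw [ih]
    simp [pairsB, List.append_assoc]

theorem alt_eq (x z : String) (m : List String) :
    get_kpoints_labels_alt (x :: (m ++ [z])) = ([fmtB x] ++ pairsB m) ++ [fmtB z] := by
  have hlen1 : ¬ ((x :: (m ++ [z])).length = 0) := by simp
  have hlen2 : 1 < (x :: (m ++ [z])).length := by simp
  have hends : PySem.List.slice (x :: (m ++ [z])) (some 1) none = m ++ [z] := by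
    rw [PySem.List.slice_from_one]; rfl
  have hstarts : PySem.List.slice (x :: (m ++ [z]))
      (some 2) (some (((x :: (m ++ [z])).length : Int) - 1)) = m.drop 1 := by
    rw [PySem.List.slice_toNat _ (by norm_num) (by omega)]
    have h2 : ((2 : Int)).toNat = 2 := rfl
    have hb : (((x :: (m ++ [z])).length : Int) - 1).toNat = m.length + 1 := by
      simp
    rw [h2, hb,
        show (x :: (m ++ [z])).drop 2 = (m ++ [z]).drop 1 from rfl]
    rcases m with _ | ⟨a, t⟩
    · rfl
    · simp
  have hfst : PySem.List.pyGetD (x :: (m ++ [z])) 0 "" = x := PySem.List.pyGetD_zero_cons ..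
  have hlast : PySem.List.pyGetD (x :: (m ++ [z])) (-1) "" = z := by
    rw [show x :: (m ++ [z]) = (x :: m) ++ [z] from by simp,
        PySem.List.pyGetD_neg_one_append_singleton]
  simp only [get_kpoints_labels_alt, if_neg hlen1, if_pos hlen2]
  rw [hends, hstarts, zipEO m z, hfst, hlast]
  simp

theorem get_kpoints_labels_eq (spl : List String) :
    get_kpoints_labels spl = get_kpoints_labels_alt spl := by
  cases spl with
  | nil => rfl
  | cons x rest =>
    rcases List.eq_nil_or_concat rest with hr | ⟨m, z, hr⟩
    · subst hr
      rfl
    · rw [List.concat_eq_append] at hr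
      subst hr
      have hA : get_kpoints_labels (x :: (m ++ [z])) = ([fmtB x] ++ pairsB m) ++ [fmtB z] := by
        unfold get_kpoints_labels
        rw [PySem.List.enumerate_cons]
        simp only [List.foldl_cons]
        have e0 : stepA (x :: (m ++ [z])) [] ((0 : Int), x) = [fmtA x] := by
          unfold stepA
          rw [if_pos rfl]
          rfl
        rw [e0]
        have h := loopA_suffix m (x :: (m ++ [z])) [fmtA x] z 1 (by norm_num) rfl
        have hcast : ((1 : Nat) : Int) = (0 : Int) + 1 := by norm_num
        rw [hcast] at h
        rw [h, fmt_eq]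
      rw [hA, alt_eq]

-- ===== VERDICT (by name: the statement is the Claim_ definition above) =====
theorem get_kpoints_labels_spec : Claim_equal_get_kpoints_labels := by
  intro spl _ _
  exact get_kpoints_labels_eq spl
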